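-- pv_equiv track=rewrite | github.com/zhangyu345293721/leetcode | src/leetcodepython/array/get_intersection_349.py | get_intersection3
-- ===== SOURCE A (Python) =====
-- from typing import List
--
-- def get_intersection3(arr1: List[int], arr2: List[int]) -> List[int]:
--     '''
--         两个数组求交集
--     Args:
--         arr1: 数组1
--         arr2: 数组2
--
--     Returns:
--         数组交集
--     '''
--     s, arr = set(), []
--     for ele in arr1:
--         s.add(ele)
--     for ele in arr2:
--         if ele in s:
--             arr.append(ele)
--             s.remove(ele)
--     return arr
-- ===== SOURCE B (Python) =====
-- def get_intersection3(arr1, arr2):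
--     return [x for i, x in enumerate(arr2) if x in arr1 and x not in arr2[:i]]
-- ===== Notes on version B (the rewrite author's own statement) =====
-- stated objective: simpler
-- what changed: B drops A's auxiliary set and its dedup-by-removal state entirely: a single comprehension keeps arr2[i] iff it occurs in arr1 (direct list scan) and has no earlier occurrence in the prefix arr2[:i] (index-based dedup), trading A's O(n+m) hashing for a shorter brute-force O(m*(n+m)) scan.
import Mathlib
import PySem

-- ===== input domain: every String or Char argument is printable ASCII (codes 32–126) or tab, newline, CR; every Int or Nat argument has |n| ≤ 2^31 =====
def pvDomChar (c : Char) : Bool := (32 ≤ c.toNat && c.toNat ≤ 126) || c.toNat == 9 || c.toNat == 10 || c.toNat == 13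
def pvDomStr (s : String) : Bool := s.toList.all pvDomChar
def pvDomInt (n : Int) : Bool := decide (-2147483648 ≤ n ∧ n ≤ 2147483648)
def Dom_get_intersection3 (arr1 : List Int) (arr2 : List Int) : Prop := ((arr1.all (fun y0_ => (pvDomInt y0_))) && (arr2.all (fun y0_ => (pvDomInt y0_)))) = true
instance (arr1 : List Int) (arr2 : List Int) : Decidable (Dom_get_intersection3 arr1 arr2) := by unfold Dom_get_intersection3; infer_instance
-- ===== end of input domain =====

-- B replaces A's set-based single pass with a brute-force comprehension deduplicating via the prefix arr2[:i] (simpler, no auxiliary set; quadratic).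


-- ===== PORT A =====
-- 's.remove(ele)' is guarded by 'ele in s', so it never raises; Set.remove? there is
-- 'some (Set.discard s ele)', and the port writes the removal as that discard.
def get_intersection3 (arr1 : List Int) (arr2 : List Int) : List Int :=
  let s0 : PySem.Set Int := arr1.foldl PySem.Set.add PySem.Set.empty
  let res := arr2.foldl
    (fun (st : PySem.Set Int × List Int) ele =>
      if PySem.Set.contains st.1 ele then
        (PySem.Set.discard st.1 ele, st.2 ++ [ele])
      else st)
    (s0, [])
  res.2

-- ===== PORT B =====
-- [x for i, x in enumerate(arr2) if x in arr1 and x not in arr2[:i]]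
def get_intersection3_alt (arr1 : List Int) (arr2 : List Int) : List Int :=
  ((PySem.List.enumerate arr2 0).filter
    (fun p => arr1.contains p.2 && !(PySem.List.slice arr2 none (some p.1)).contains p.2)).map
    Prod.snd

-- ===== PRECONDITION & SPEC =====
def Spec_get_intersection3 (arr1 : List Int) (arr2 : List Int) (out : List Int) : Prop := out = get_intersection3_alt arr1 arr2
instance (arr1 : List Int) (arr2 : List Int) (out : List Int) : Decidable (Spec_get_intersection3 arr1 arr2 out) := by unfold Spec_get_intersection3; infer_instance

-- ===== CLAIM (what is proved, stated in full; the proofs are below) =====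
def Claim_equal_get_intersection3 : Prop := ∀ (arr1 : List Int) (arr2 : List Int), Dom_get_intersection3 arr1 arr2 → Spec_get_intersection3 arr1 arr2 (get_intersection3 arr1 arr2)

-- ===== LEMMAS AND PROOFS =====

-- membership in a discarded set, as a boolean
theorem contains_discard {α : Type} [BEq α] [LawfulBEq α] (s : PySem.Set α) (x y : α) :
    PySem.Set.contains (PySem.Set.discard s x) y = (PySem.Set.contains s y && !(y == x)) := by
  simp [PySem.Set.contains, PySem.Set.discard, List.mem_filter]
  by_cases hyx : y = x
  · subst hyx; simp
  · by_cases hys : y ∈ s <;> simp [hys, hyx]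

-- A's loop over the remaining list l, with the processed prefix made explicit:
-- provided the set s holds exactly the arr1-elements not yet seen in pref,
-- the loop produces acc ++ B's comprehension over l (with indices offset by pref.length).
theorem loopA_eq (arr1 : List Int) :
    ∀ (l pref acc : List Int) (s : PySem.Set Int),
    (∀ x : Int, PySem.Set.contains s x = (arr1.contains x && !pref.contains x)) →
    (l.foldl
      (fun (st : PySem.Set Int × List Int) ele =>
        if PySem.Set.contains st.1 ele then
          (PySem.Set.discard st.1 ele, st.2 ++ [ele])
        else st)
      (s, acc)).2
    = acc ++ ((PySem.List.enumerate l (pref.length : Int)).filter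
        (fun p => arr1.contains p.2 &&
          !(PySem.List.slice (pref ++ l) none (some p.1)).contains p.2)).map Prod.snd := by
  intro l
  induction l with
  | nil => intro pref acc s _; simp [PySem.List.enumerate]
  | cons x xs ih =>
    intro pref acc s hs
    have hslice : PySem.List.slice (pref ++ x :: xs) none (some (pref.length : Int)) = pref := by
      rw [PySem.List.slice_to_natCast]; simp
    rw [PySem.List.enumerate_cons, List.filter_cons]
    simp only [List.foldl_cons, hs x, hslice]
    by_cases h1 : arr1.contains x = true
    · by_cases h2 : pref.contains x = true
      · -- seen before: dropped by both
        simp only [h1, h2, Bool.not_true, Bool.and_false, Bool.false_eq_true, if_false]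
        rw [ih (pref ++ [x]) acc s ?_]
        · simp
        · intro y; rw [hs y]
          by_cases hxy : y = x
          · subst hxy
            rw [show (pref ++ [y]).contains y = true from by simp, h2]
          · rw [show (pref ++ [x]).contains y = pref.contains y from by simp [hxy]]
      · -- kept by both
        simp only [h1, h2, Bool.not_false, Bool.and_true, if_true]
        rw [ih (pref ++ [x]) (acc ++ [x]) (PySem.Set.discard s x) ?_]
        · simp
        · intro y; rw [contains_discard, hs y]
          by_cases hxy : y = x
          · subst hxy; simp
          · rw [show (y == x) = false from by simp [hxy],
                show (pref ++ [x]).contains y = pref.contains y from by simp [hxy]]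
            simp
    · -- not in arr1: dropped by both
      simp only [h1, Bool.false_and, Bool.false_eq_true, if_false]
      rw [ih (pref ++ [x]) acc s ?_]
      · simp
      · intro y; rw [hs y]
        simp only [Bool.not_eq_true] at h1
        by_cases hxy : y = x
        · subst hxy; rw [h1]; simp
        · rw [show (pref ++ [x]).contains y = pref.contains y from by simp [hxy]]

theorem contains_ofList_foldl (arr1 : List Int) (x : Int) :
    PySem.Set.contains (arr1.foldl PySem.Set.add PySem.Set.empty) x = arr1.contains x := by
  rw [show arr1.foldl PySem.Set.add PySem.Set.empty = PySem.Set.ofList arr1 from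
    (PySem.Set.ofList_eq_foldl arr1).symm]
  simp [PySem.Set.contains, PySem.Set.mem_ofList]

-- ===== VERDICT (by name: the statement is the Claim_ definition above) =====
theorem get_intersection3_spec : Claim_equal_get_intersection3 := by
  intro arr1 arr2 _
  unfold Spec_get_intersection3 get_intersection3 get_intersection3_alt
  have := loopA_eq arr1 arr2 [] [] (arr1.foldl PySem.Set.add PySem.Set.empty)
    (fun x => by rw [contains_ofList_foldl]; simp)
  simpa using this
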